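-- pv_equiv track=rewrite | github.com/FirstPersonSF/storyos-api | services/voice_transformer_llm.py | _build_lexicon_instructions
-- ===== SOURCE A (Python) =====
-- from typing import Dict, List, Any, Optional
--
-- def _build_lexicon_instructions(lexicon: Dict[str, Any]) -> str:
--     """Convert lexicon to instructions"""
--     instructions = []
--
--     required = lexicon.get('required', [])
--     if required:
--         instructions.append("REQUIRED phrases to include when appropriate:")
--         for term in required:
--             instructions.append(f'  - "{term}"')
--
--     banned = lexicon.get('banned', [])
--     if banned:
--         if instructions:
--             instructions.append("")
--         instructions.append("BANNED phrases to avoid:")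
--         for term in banned:
--             instructions.append(f'  - "{term}"')
--
--     preferred = lexicon.get('preferred', [])
--     if preferred:
--         if instructions:
--             instructions.append("")
--         instructions.append("PREFERRED terms:")
--         for term in preferred:
--             instructions.append(f'  - "{term}"')
--
--     return '\n'.join(instructions)
-- ===== SOURCE B (Python) =====
-- def _build_lexicon_instructions(lexicon):
--     """Convert lexicon to instructions"""
--     def go(entries):
--         # recursive, back-to-front: build the rest first, then glue this section on
--         if not entries:
--             return ''
--         key, header = entries[0]
--         rest = go(entries[1:])
--         terms = lexicon.get(key, [])
--         if not terms:
--             return rest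
--         section = header
--         for t in terms:
--             section += '\n  - "' + str(t) + '"'
--         return section if rest == '' else section + '\n\n' + rest
--     return go([('required', 'REQUIRED phrases to include when appropriate:'),
--                ('banned', 'BANNED phrases to avoid:'),
--                ('preferred', 'PREFERRED terms:')])
-- ===== Notes on version B (the rewrite author's own statement) =====
-- stated objective: alternative
-- what changed: Replaces A's single forward pass that accumulates a flat line list with stateful blank-line insertion and a final join by a back-to-front recursion that builds each section as one concatenated string and glues it onto the already-built suffix with '\n\n', using no line list and no join.
import Mathlib
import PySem

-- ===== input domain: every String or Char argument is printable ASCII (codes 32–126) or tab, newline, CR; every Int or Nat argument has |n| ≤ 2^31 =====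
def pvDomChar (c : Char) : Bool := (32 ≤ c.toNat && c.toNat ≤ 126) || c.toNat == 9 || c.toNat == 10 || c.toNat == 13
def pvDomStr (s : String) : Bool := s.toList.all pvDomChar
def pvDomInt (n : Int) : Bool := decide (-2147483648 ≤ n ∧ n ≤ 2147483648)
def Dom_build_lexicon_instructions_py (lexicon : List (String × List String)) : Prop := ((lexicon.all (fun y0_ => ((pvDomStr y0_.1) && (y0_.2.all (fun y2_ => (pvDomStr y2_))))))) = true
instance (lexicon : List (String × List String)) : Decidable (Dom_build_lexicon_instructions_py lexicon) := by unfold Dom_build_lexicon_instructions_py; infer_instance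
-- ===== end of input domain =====

-- B replaces A's forward pass (flat line list + stateful blank-line insertion + final join)
-- by a back-to-front recursion gluing one concatenated string per nonempty section (objective: alternative).

-- dict.get(key, []) on an association list: first match, default []
def pvGetD (lexicon : List (String × List String)) (k : String) : List String :=
  match lexicon with
  | [] => []
  | (k', v) :: rest => if k' == k then v else pvGetD rest k

-- ===== PORT A =====
-- f'  - "{term}"'
def pvQuote (t : String) : String := "  - \"" ++ t ++ "\""

def build_lexicon_instructions_py (lexicon : List (String × List String)) : String :=
  let instructions : List String := []
  let required := pvGetD lexicon "required"
  let instructions :=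
    if required ≠ [] then
      (instructions ++ ["REQUIRED phrases to include when appropriate:"]) ++ required.map pvQuote
    else instructions
  let banned := pvGetD lexicon "banned"
  let instructions :=
    if banned ≠ [] then
      ((if instructions ≠ [] then instructions ++ [""] else instructions)
        ++ ["BANNED phrases to avoid:"]) ++ banned.map pvQuote
    else instructions
  let preferred := pvGetD lexicon "preferred"
  let instructions :=
    if preferred ≠ [] then
      ((if instructions ≠ [] then instructions ++ [""] else instructions)
        ++ ["PREFERRED terms:"]) ++ preferred.map pvQuote
    else instructions
  PySem.Str.join "\n" instructions

-- ===== PORT B =====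
-- section += '\n  - "' + t + '"' over the terms, starting from the header
def pvSection (header : String) (terms : List String) : String :=
  terms.foldl (fun sect t => sect ++ "\n  - \"" ++ t ++ "\"") header

-- the inner recursive go(entries): build the rest first, then glue this section on
def pvGo (lexicon : List (String × List String)) : List (String × String) → String
  | [] => ""
  | (key, header) :: entries =>
    let rest := pvGo lexicon entries
    let terms := pvGetD lexicon key
    if terms = [] then rest
    else
      let sect := pvSection header terms
      if rest = "" then sect else sect ++ "\n\n" ++ rest

def build_lexicon_instructions_py_alt (lexicon : List (String × List String)) : String :=
  pvGo lexicon
    [("required", "REQUIRED phrases to include when appropriate:"),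
     ("banned", "BANNED phrases to avoid:"),
     ("preferred", "PREFERRED terms:")]

-- ===== PRECONDITION & SPEC =====
def Spec_build_lexicon_instructions_py (lexicon : List (String × List String)) (out : String) : Prop := out = build_lexicon_instructions_py_alt lexicon
instance (lexicon : List (String × List String)) (out : String) : Decidable (Spec_build_lexicon_instructions_py lexicon out) := by unfold Spec_build_lexicon_instructions_py; infer_instance

-- ===== CLAIM (what is proved, stated in full; the proofs are below) =====
def Claim_equal_build_lexicon_instructions_py : Prop := ∀ (lexicon : List (String × List String)), Dom_build_lexicon_instructions_py lexicon → Spec_build_lexicon_instructions_py lexicon (build_lexicon_instructions_py lexicon)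

-- ===== LEMMAS AND PROOFS =====

-- join "\n" (x :: l) spelled as x followed by "\n"-prefixed items
theorem join_cons_flat (sep x : List Char) (l : List (List Char)) :
    PySem.Chars.join sep (x :: l) = x ++ l.flatMap (fun y => sep ++ y) := by
  induction l generalizing x with
  | nil => simp [PySem.Chars.join_singleton]
  | cons y l ih => rw [PySem.Chars.join_cons_cons, ih, List.flatMap_cons]; simp [List.append_assoc]

-- B's section fold as header ++ flatMap of quoted terms, at the char level
theorem section_toList (header : String) (terms : List String) :
    (pvSection header terms).toList =
      header.toList ++ terms.flatMap (fun t => '\n' :: ("  - \"" ++ t ++ "\"").toList) := by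
  unfold pvSection
  induction terms generalizing header with
  | nil => simp
  | cons t ts ih => simp [ih, List.append_assoc]

theorem section_ne_nil (header : String) (terms : List String) (h : header.toList ≠ []) :
    (pvSection header terms).toList ≠ [] := by
  rw [section_toList]
  intro hc
  exact h (List.append_eq_nil_iff.mp hc).1

theorem section_ne_empty (header : String) (terms : List String) (h : header.toList ≠ []) :
    (pvSection header terms = "") = False := by
  simp only [eq_iff_iff, iff_false]
  intro hc
  exact section_ne_nil header terms h (by rw [hc]; rfl)

theorem pv_main (lexicon : List (String × List String)) :
    build_lexicon_instructions_py lexicon = build_lexicon_instructions_py_alt lexicon := by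
  unfold build_lexicon_instructions_py build_lexicon_instructions_py_alt
  simp only [pvGo]
  apply String.toList_inj.mp
  rcases hr : pvGetD lexicon "required" with _ | ⟨rt, rts⟩ <;>
  rcases hb : pvGetD lexicon "banned" with _ | ⟨bt, bts⟩ <;>
  rcases hp : pvGetD lexicon "preferred" with _ | ⟨pt, pts⟩ <;>
    simp [hr, hb, hp, section_ne_empty, PySem.Str.toList_join, join_cons_flat,
      section_toList, pvQuote, List.flatMap_map, List.append_assoc]

-- ===== VERDICT (by name: the statement is the Claim_ definition above) =====
theorem build_lexicon_instructions_py_spec : Claim_equal_build_lexicon_instructions_py := by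
  intro lexicon _
  unfold Spec_build_lexicon_instructions_py
  exact pv_main lexicon
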